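-- pv_equiv track=rewrite | github.com/keggsmurph21/krc-web-excel-app | board_committee_alg.py | find_unique_pairings
-- ===== SOURCE A (Python) =====
-- import itertools
--
-- def common_member(a, b):
--     #returns true if there is a common element in a and b, false otherwise
--
--     a_set = set(a)
--     b_set = set(b)
--     if len(a_set.intersection(b_set)) > 0:
--         return(True)
--     return(False)
--
-- def find_unique_pairings(committees):
--     #Finds all unique committee pairings given a list of the committees
--
--     iterations = list(itertools.combinations(committees,3))
--     unique_committee_pairings = []
--     for i in iterations:
--         for j in iterations:
--             common_element = common_member(i,j)
--             num = []
--             if common_element == False: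
--                 num.extend(i)
--                 num.extend(j)
--                 last_two = []
--                 for k in range(len(committees)):
--                     if committees[k] not in num:
--                         num.append(committees[k])
--             if len(num) != 0:
--                 unique_committee_pairings.append(num)
--     return unique_committee_pairings
-- ===== SOURCE B (Python) =====
-- import itertools
--
-- def find_unique_pairings(committees):
--     # For each first 3-subset, take the second 3-subsets directly from the
--     # value-complement, so no disjointness test is needed.
--     out = []
--     for i in itertools.combinations(committees, 3):
--         used = set(i)
--         remaining = [c for c in committees if c not in used]
--         for j in itertools.combinations(remaining, 3):
--             num = list(i) + list(j)
--             seen = set(num)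
--             for c in committees:
--                 if c not in seen:
--                     num.append(c)
--                     seen.add(c)
--             out.append(num)
--     return out
-- ===== Notes on version B (the rewrite author's own statement) =====
-- stated objective: alternative
-- what changed: Instead of scanning all ordered pairs of 3-combinations and testing each pair for a common member, B enumerates the second 3-subset directly from the value-complement of the first, eliminating the disjointness test and the non-disjoint pairs entirely; leftovers are appended with a seen-set instead of re-scanning the growing num list.
import Mathlib
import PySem

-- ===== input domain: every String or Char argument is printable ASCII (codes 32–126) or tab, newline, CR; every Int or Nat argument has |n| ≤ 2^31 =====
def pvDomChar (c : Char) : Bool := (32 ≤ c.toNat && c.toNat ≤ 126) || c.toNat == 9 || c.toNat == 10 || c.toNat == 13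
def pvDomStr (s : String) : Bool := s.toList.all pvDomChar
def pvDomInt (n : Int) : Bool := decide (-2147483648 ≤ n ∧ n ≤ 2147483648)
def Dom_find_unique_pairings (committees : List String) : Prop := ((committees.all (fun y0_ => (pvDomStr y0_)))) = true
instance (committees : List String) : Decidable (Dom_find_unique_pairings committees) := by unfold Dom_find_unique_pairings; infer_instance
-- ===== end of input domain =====

-- B enumerates the second 3-subset from the value-complement of the first instead of
-- filtering all pairs of 3-subsets with a common-member test (a different decomposition, same result).


-- ===== PORT A =====
def common_member (a b : List String) : Bool :=
  let a_set : PySem.Set String := PySem.Set.ofList a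
  let b_set : PySem.Set String := PySem.Set.ofList b
  if (PySem.Set.inter a_set b_set).length > 0 then true else false

def find_unique_pairings (committees : List String) : List (List String) :=
  let iterations := PySem.List.combinations committees 3
  let unique_committee_pairings : List (List String) := []
  iterations.foldl (fun unique_committee_pairings i =>
    iterations.foldl (fun unique_committee_pairings j =>
      let common_element := common_member i j
      let num : List String := []
      let num :=
        if common_element == false then
          let num := num ++ i
          let num := num ++ j
          (PySem.List.pyRange 0 (committees.length : Int) 1).foldl (fun num k =>
            if (PySem.List.pyGetD committees k "") ∉ num
            then num ++ [PySem.List.pyGetD committees k ""] else num) num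
        else num
      if num.length ≠ 0 then unique_committee_pairings ++ [num]
      else unique_committee_pairings) unique_committee_pairings) unique_committee_pairings

-- ===== PORT B =====
def find_unique_pairings_alt (committees : List String) : List (List String) :=
  let out : List (List String) := []
  (PySem.List.combinations committees 3).foldl (fun out i =>
    let used : PySem.Set String := PySem.Set.ofList i
    let remaining := committees.filter (fun c => !(PySem.Set.contains used c))
    (PySem.List.combinations remaining 3).foldl (fun out j =>
      let num := i ++ j
      let seen : PySem.Set String := PySem.Set.ofList num
      let p := committees.foldl
        (fun (p : List String × PySem.Set String) c =>
          if !(PySem.Set.contains p.2 c) then (p.1 ++ [c], PySem.Set.add p.2 c) else p)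
        (num, seen)
      out ++ [p.1]) out) out

-- ===== PRECONDITION & SPEC =====
def Spec_find_unique_pairings (committees : List String) (out : List (List String)) : Prop := out = find_unique_pairings_alt committees
instance (committees : List String) (out : List (List String)) : Decidable (Spec_find_unique_pairings committees out) := by unfold Spec_find_unique_pairings; infer_instance

-- ===== CLAIM (what is proved, stated in full; the proofs are below) =====
def Claim_equal_find_unique_pairings : Prop := ∀ (committees : List String), Dom_find_unique_pairings committees → Spec_find_unique_pairings committees (find_unique_pairings committees)

-- ===== LEMMAS AND PROOFS =====

-- A's leftover loop, as a named function (proof helper only)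
def pvDedup (committees num : List String) : List String :=
  committees.foldl (fun num c => if c ∉ num then num ++ [c] else num) num

-- combinations of a filtered list = the combinations whose elements all satisfy the predicate
theorem combinations_filter {α : Type} (p : α → Bool) :
    ∀ (xs : List α) (r : Nat),
      PySem.List.combinations (xs.filter p) r
        = (PySem.List.combinations xs r).filter (fun c => c.all p) := by
  intro xs
  induction xs with
  | nil =>
    intro r
    cases r with
    | zero => simp [PySem.List.combinations_zero]
    | succ r => simp [PySem.List.combinations_nil_succ]
  | cons x xs ih =>
    intro r
    cases r with
    | zero => simp [PySem.List.combinations_zero]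
    | succ r =>
      by_cases hx : p x = true
      · simp only [List.filter_cons, hx, if_pos, PySem.List.combinations_cons_succ,
          List.filter_append, List.filter_map, ih]
        congr 2
        apply List.filter_congr
        intro c _
        simp [Function.comp, hx]
      · rw [List.filter_cons, if_neg (by simp [hx]), PySem.List.combinations_cons_succ,
          List.filter_append, List.filter_map, ih]
        have h0 : (List.filter ((fun c => c.all p) ∘ (fun c => x :: c))
            (PySem.List.combinations xs r)) = [] := by
          apply List.filter_eq_nil_iff.mpr
          intro c _
          simp [Function.comp, hx]
        rw [h0]
        simp

-- common_member i j = false  ↔  every element of j is not in i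
theorem common_member_eq_false_iff (i j : List String) :
    common_member i j = false ↔ ∀ c ∈ j, c ∉ i := by
  by_cases hx : ∃ c, c ∈ i ∧ c ∈ j
  · rcases hx with ⟨c, hci, hcj⟩
    have hmem : c ∈ PySem.Set.inter (PySem.Set.ofList i) (PySem.Set.ofList j) :=
      (PySem.Set.mem_inter _ _ _).mpr
        ⟨(PySem.Set.mem_ofList _ _).mpr hci, (PySem.Set.mem_ofList _ _).mpr hcj⟩
    have hcm : common_member i j = true := by
      simp [common_member, List.length_pos_of_mem hmem]
    rw [hcm]
    simp only [Bool.true_eq_false, false_iff]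
    push Not
    exact ⟨c, hcj, hci⟩
  · have hnil : PySem.Set.inter (PySem.Set.ofList i) (PySem.Set.ofList j) = [] := by
      apply List.eq_nil_iff_forall_not_mem.mpr
      intro c hc
      have h2 := (PySem.Set.mem_inter _ _ _).mp hc
      exact hx ⟨c, (PySem.Set.mem_ofList _ _).mp h2.1, (PySem.Set.mem_ofList _ _).mp h2.2⟩
    have hcm : common_member i j = false := by simp [common_member, hnil]
    rw [hcm]
    simp only [true_iff]
    intro c hcj hci
    exact hx ⟨c, hci, hcj⟩

-- A's in-place dedup loop (membership test against the growing list) equals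
-- B's pair fold carrying a seen-set, whenever seen's members are exactly num's.
theorem dedup_fold_pair (xs : List String) :
    ∀ (num : List String) (seen : PySem.Set String),
      (∀ c, c ∈ seen ↔ c ∈ num) →
      (xs.foldl (fun (p : List String × PySem.Set String) c =>
          if !(PySem.Set.contains p.2 c) then (p.1 ++ [c], PySem.Set.add p.2 c) else p)
        (num, seen)).1
        = pvDedup xs num := by
  induction xs with
  | nil => intro num seen _; rfl
  | cons x xs ih =>
    intro num seen hinv
    simp only [pvDedup, List.foldl_cons] at *
    by_cases hx : x ∈ num
    · have hc : PySem.Set.contains seen x = true :=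
        (PySem.Set.contains_iff _ _).mpr ((hinv x).mpr hx)
      simp only [hc, Bool.not_true, Bool.false_eq_true, if_false, if_neg (not_not_intro hx)]
      exact ih num seen hinv
    · have hc : PySem.Set.contains seen x = false := by
        rw [Bool.eq_false_iff]
        intro h
        exact hx ((hinv x).mp ((PySem.Set.contains_iff _ _).mp h))
      simp only [hc, Bool.not_false, if_true, if_pos hx]
      apply ih
      intro c
      rw [PySem.Set.mem_add, hinv, List.mem_append, List.mem_singleton]

-- result of the dedup loop is nonempty when its seed is
theorem dedup_fold_ne_nil (xs : List String) :
    ∀ (num : List String), num ≠ [] → pvDedup xs num ≠ [] := by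
  induction xs with
  | nil => intro num h; exact h
  | cons x xs ih =>
    intro num h
    simp only [pvDedup, List.foldl_cons] at *
    by_cases hx : x ∈ num
    · rw [if_neg (not_not_intro hx)]; exact ih num h
    · rw [if_pos hx]
      exact ih _ (by simp)

-- ===== VERDICT (by name: the statement is the Claim_ definition above) =====
theorem find_unique_pairings_spec : Claim_equal_find_unique_pairings := by
  intro committees _
  unfold Spec_find_unique_pairings find_unique_pairings find_unique_pairings_alt
  refine PySem.List.foldl_congr_mem (PySem.List.combinations committees 3) _ _ [] ?_
  intro acc i hi
  have hlen : i.length = 3 := PySem.List.length_of_mem_combinations hi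
  have hine : i ≠ [] := by intro h; simp [h] at hlen
  have hrem : PySem.List.combinations
      (committees.filter (fun c => !(PySem.Set.contains (PySem.Set.ofList i) c))) 3
      = (PySem.List.combinations committees 3).filter
          (fun j => common_member i j == false) := by
    rw [combinations_filter]
    apply List.filter_congr
    intro j _
    rcases Bool.eq_false_or_eq_true (common_member i j) with h | h
    · -- common_member i j = true : both predicates are false
      rw [h, show ((true : Bool) == false) = false from rfl, Bool.eq_false_iff]
      intro hall
      rw [List.all_eq_true] at hall
      have hne : ¬ (∀ c ∈ j, c ∉ i) := by
        intro hall'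
        rw [← common_member_eq_false_iff] at hall'
        rw [hall'] at h; cases h
      push Not at hne
      rcases hne with ⟨c, hcj, hci⟩
      have h3 := hall c hcj
      rw [Bool.not_eq_true', Bool.eq_false_iff] at h3
      exact h3 ((PySem.Set.contains_iff _ _).mpr ((PySem.Set.mem_ofList _ _).mpr hci))
    · -- common_member i j = false : both predicates are true
      rw [h, show ((false : Bool) == false) = true from rfl, List.all_eq_true]
      rw [common_member_eq_false_iff] at h
      intro c hc
      rw [Bool.not_eq_true', Bool.eq_false_iff]
      intro hcon
      exact h c hc ((PySem.Set.mem_ofList _ _).mp ((PySem.Set.contains_iff _ _).mp hcon))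
  refine Eq.trans
    (Eq.trans
      (PySem.List.foldl_congr_mem' _ _
        (fun acc' j => if common_member i j == false
          then acc' ++ [pvDedup committees (i ++ j)] else acc') acc ?_)
      (PySem.List.foldl_append_if _ _ _ acc))
    (Eq.symm
      (Eq.trans
        (PySem.List.foldl_congr_mem' _ _
          (fun acc' j => acc' ++ [pvDedup committees (i ++ j)]) acc ?_)
        (Eq.trans
          (PySem.List.foldl_append_singleton_eq_map _ _ acc)
          (by rw [hrem]))))
  · -- A's inner step = append-if with the dedup value
    intro j _ acc'
    simp only [List.nil_append]
    rcases Bool.eq_false_or_eq_true (common_member i j) with h | h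
    · -- common member: A builds num = [] and appends nothing
      have hcond : ¬ ((common_member i j == false) = true) := by rw [h]; simp
      rw [if_neg hcond, if_neg hcond]
      simp
    · -- disjoint: A appends i ++ j ++ leftovers
      have hcond : (common_member i j == false) = true := by rw [h]; rfl
      simp only [if_pos hcond]
      rw [PySem.List.foldl_pyRange_zero_pyGetD' committees ""
            (fun num c => if c ∉ num then num ++ [c] else num) (i ++ j)]
      have hpos : (List.foldl (fun num c => if c ∉ num then num ++ [c] else num)
          (i ++ j) committees).length ≠ 0 := by
        have hne2 := dedup_fold_ne_nil committees (i ++ j) (by simp [hine])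
        simpa [pvDedup, List.length_eq_zero_iff] using hne2
      rw [if_pos hpos]
      rfl
  · -- B's inner step = append-singleton with the same dedup value
    intro j _ acc'
    show acc' ++ [(committees.foldl
        (fun (p : List String × PySem.Set String) c =>
          if !(PySem.Set.contains p.2 c) then (p.1 ++ [c], PySem.Set.add p.2 c) else p)
        (i ++ j, PySem.Set.ofList (i ++ j))).1]
      = acc' ++ [pvDedup committees (i ++ j)]
    rw [dedup_fold_pair committees (i ++ j) (PySem.Set.ofList (i ++ j))
          (fun c => PySem.Set.mem_ofList _ _)]
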